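-- pv_equiv track=rewrite | github.com/walkingjohnny/academic-research-skills | scripts/check_v3_7_3_three_layer_citation.py | _strip_fenced_code_blocks
-- ===== SOURCE A (Python) =====
-- def _strip_fenced_code_blocks(text: str) -> str:
--     """Replace content inside ``` fenced code blocks with blank lines so
--     line numbers in violation messages stay accurate. v3.7.3 F7 closure
--     (gemini review): example ref/anchor markers in spec docs and
--     documentation belong inside code fences and must not be linted as
--     contract violations.
--
--     Handles ``` and ~~~ fences. Indented (4-space) code blocks are not
--     handled — they are rare for Markdown contributors and unlikely to
--     contain HTML comment markers in practice."""
--     out_lines = []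
--     in_fence = False
--     fence_char = None
--     for line in text.split("\n"):
--         stripped = line.lstrip()
--         if not in_fence:
--             if stripped.startswith("```") or stripped.startswith("~~~"):
--                 in_fence = True
--                 fence_char = stripped[:3]
--                 out_lines.append(line)  # keep fence opener
--                 continue
--             out_lines.append(line)
--         else:
--             if stripped.startswith(fence_char):
--                 in_fence = False
--                 fence_char = None
--                 out_lines.append(line)  # keep fence closer
--                 continue
--             # Blank out content inside fence
--             out_lines.append("")
--     return "\n".join(out_lines)
-- ===== SOURCE B (Python) =====
-- def _strip_fenced_code_blocks(text: str) -> str: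
--     """Span-based rewrite: walk the lines with an index; on a fence opener
--     consume the whole fenced span in an inner loop (blanking its interior
--     and keeping the closer), instead of threading an in_fence/fence_char
--     state machine through a single pass."""
--     lines = text.split("\n")
--     out = []
--     i = 0
--     n = len(lines)
--     while i < n:
--         line = lines[i]
--         stripped = line.lstrip()
--         out.append(line)
--         i += 1
--         if stripped.startswith(("```", "~~~")):
--             marker = stripped[:3]
--             while i < n and not lines[i].lstrip().startswith(marker):
--                 out.append("")
--                 i += 1
--             if i < n:
--                 out.append(lines[i])  # fence closer kept verbatim
--                 i += 1
--     return "\n".join(out)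
-- ===== Notes on version B (the rewrite author's own statement) =====
-- stated objective: alternative
-- what changed: Replaces A's single-pass state machine (in_fence flag plus fence_char threaded through every line) with an index-driven span scan: an inner loop consumes each fenced block wholesale, blanking its interior and keeping the closer, so no fence state survives between lines.
import Mathlib
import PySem

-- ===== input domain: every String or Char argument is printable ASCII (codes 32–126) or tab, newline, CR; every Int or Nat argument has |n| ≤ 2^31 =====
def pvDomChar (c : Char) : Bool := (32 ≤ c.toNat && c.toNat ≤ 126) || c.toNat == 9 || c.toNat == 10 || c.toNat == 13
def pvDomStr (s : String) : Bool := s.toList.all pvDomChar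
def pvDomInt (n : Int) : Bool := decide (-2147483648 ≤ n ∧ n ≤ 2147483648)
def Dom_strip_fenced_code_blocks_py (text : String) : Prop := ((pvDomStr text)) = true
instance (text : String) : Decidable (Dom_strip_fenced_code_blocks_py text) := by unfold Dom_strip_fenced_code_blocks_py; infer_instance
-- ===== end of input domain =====

-- B replaces A's in_fence/fence_char state machine with an index-free span scan
-- (inner loop consumes each fenced block); same O(n) cost, alternative structure.


-- ===== PORT A =====
-- A's loop: per-line state machine with in_fence : Bool and fence_char : Option String
-- (fence_char is read only when in_fence = true, where it is always `some`; the
-- getD "" below is therefore unreachable, mirroring Python's never-raised startswith(None)).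
def stripLoopA : List String → Bool → Option String → List String
  | [], _, _ => []
  | line :: rest, in_fence, fence_char =>
    let stripped := PySem.Str.lstrip line
    if !in_fence then
      if PySem.Str.startswith stripped "```" || PySem.Str.startswith stripped "~~~" then
        line :: stripLoopA rest true (some (PySem.Str.slice stripped none (some 3)))
      else
        line :: stripLoopA rest false fence_char
    else
      if PySem.Str.startswith stripped (fence_char.getD "") then
        line :: stripLoopA rest false none
      else
        "" :: stripLoopA rest true fence_char

def strip_fenced_code_blocks_py (text : String) : String :=
  PySem.Str.join "\n" (stripLoopA (((PySem.Str.split? text "\n").getD [])) false none)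

-- ===== PORT B =====
-- B's inner loop: blank out lines until one starting with `marker`, keep that closer.
mutual
  def stripSpanB (marker : String) : List String → List String
    | [] => []
    | line :: rest =>
      if PySem.Str.startswith (PySem.Str.lstrip line) marker then
        line :: stripOuterB rest
      else
        "" :: stripSpanB marker rest

  -- B's outer loop: keep each line; on a fence opener hand the tail to the span scan.
  def stripOuterB : List String → List String
    | [] => []
    | line :: rest =>
      let stripped := PySem.Str.lstrip line
      if PySem.Str.startswith stripped "```" || PySem.Str.startswith stripped "~~~" then
        line :: stripSpanB (PySem.Str.slice stripped none (some 3)) rest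
      else
        line :: stripOuterB rest
end

def strip_fenced_code_blocks_py_alt (text : String) : String :=
  PySem.Str.join "\n" (stripOuterB (((PySem.Str.split? text "\n").getD [])))

-- ===== PRECONDITION & SPEC =====
def Spec_strip_fenced_code_blocks_py (text : String) (out : String) : Prop := out = strip_fenced_code_blocks_py_alt text
instance (text : String) (out : String) : Decidable (Spec_strip_fenced_code_blocks_py text out) := by unfold Spec_strip_fenced_code_blocks_py; infer_instance

-- ===== CLAIM (what is proved, stated in full; the proofs are below) =====
def Claim_equal_strip_fenced_code_blocks_py : Prop := ∀ (text : String), Dom_strip_fenced_code_blocks_py text → Spec_strip_fenced_code_blocks_py text (strip_fenced_code_blocks_py text)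

-- ===== LEMMAS AND PROOFS =====
-- A's state machine coincides with B's two mutually recursive loops:
-- state (false, c) behaves like stripOuterB (c is never read), state (true, some m) like stripSpanB m.
theorem stripLoopA_eq_B (lines : List String) :
    (∀ c, stripLoopA lines false c = stripOuterB lines) ∧
    (∀ m, stripLoopA lines true (some m) = stripSpanB m lines) := by
  induction lines with
  | nil => simp [stripLoopA, stripOuterB, stripSpanB]
  | cons line rest ih =>
    refine ⟨fun c => ?_, fun m => ?_⟩
    · simp only [stripLoopA, stripOuterB, Bool.not_false, if_true]
      split
      · exact congrArg _ (ih.2 _)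
      · exact congrArg _ (ih.1 _)
    · simp only [stripLoopA, stripSpanB, Bool.not_true, Bool.false_eq_true, if_false,
        Option.getD_some]
      split
      · exact congrArg _ (ih.1 _)
      · exact congrArg _ (ih.2 _)

-- ===== VERDICT (by name: the statement is the Claim_ definition above) =====
theorem strip_fenced_code_blocks_py_spec : Claim_equal_strip_fenced_code_blocks_py := by
  intro text _
  show _ = _
  unfold strip_fenced_code_blocks_py strip_fenced_code_blocks_py_alt
  rw [(stripLoopA_eq_B _).1]
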